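/- GENERATED by mk_final_copies.py from the proof of the farm's unit `imdct_step3_inner_r_loop.1` (farm:imdct_step3_inner_r_loop.1.1: Proof.lean) as the
   re-elaboration sweep compiled it — do not edit. -/
import Asan.CheckWalk
import Vorbis.Spec.Units.imdct_step3_inner_r_loop_1
open X86 X86.User Asan Vorbis Vorbis.Spec

set_option maxRecDepth 4000
set_option maxHeartbeats 4000000

/-- Segment 1 of `imdct_step3_inner_r_loop` (the function's entry 0x105740 … the loop head `loop1` = 0x105af9: six pushes,
`sub rsp, 28H`, `k1` spilled to `[rsp + 1CH]`, two `movsxd`, two `lea`, `sar`, `mov`, `jmp`; C lines 2481-2488): from the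
entry with the precondition to the exit assertion `AtHead` with `t = 0`, BUILT from the walker's facts — the frame (`w_rsp`,
the seven stack slots by `u_resolve`), the footprint so far (`u_same`), `ShadowUntouched` (`v_untouched`), the spilled `k1`
read back from the store, and the ghost values of the registers as numbers (`arg32_sar`, `arg32_sext`, `IsNeg32.sext`,
`add_mul4`, `add_neg_mul4` of Vorbis/Spec/Common.lean). -/
theorem Vorbis.Spec.Worked.imdct_step3_inner_r_loop_1_ok : Vorbis.Spec.imdct_step3_inner_r_loop_1.Statement := by
  intro Lay hLay μ hμ u₀ hcode others frames len i0 koff k1 ue ret he hpre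
  have he0 := he
  have hpre0 := hpre
  v_entry he
  obtain ⟨hsh, hn31, hi0, hneg, hk1, hk1lt, hpair, hlive, hA⟩ := hpre
  have hsp := hsh.rsp
  -- 0x105740 … 0x10576a (stb_vorbis_fixed.c:2481-2488): the prologue, up to the loop head
  u_walk hcode [hμ.vendor] until [Vorbis.L.imdct_step3_inner_r_loop.loop1] span [Vorbis.L.textLo, Vorbis.L.textHi] side (v_side)
  -- 0x105af9 (stb_vorbis_fixed.c:2488 `for (i=lim >> 2; i > 0; --i) {`): the loop head, `t = 0`
  refine ReachVia.done ⟨w_rip, ?_⟩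
  -- where the buffer is: inside the data space, no wrap-around
  have hwhere := hlive.where_ hsh.inv hsh.offText (by have := hpair.hi; omega) (by omega)
  have hhi := hpair.hi
  have hlo := hpair.lo
  -- the three 32-bit arguments as numbers
  have e15 := arg32_sar ue .rdi 2 hn31
  have hi31 : arg32 ue .rdx < 2 ^ 31 := by omega
  have edx := arg32_sext ue .rdx hi31
  have ecx := hneg.sext
  obtain ⟨hk1', hk2', _⟩ := hneg
  refine ⟨⟨he0, hpre0, w_eq, ?abi, ⟨w_rsp, ?_, ?_, ?_, ?_, ?_, ?_, ?_⟩, ?same, ?shadow⟩, Nat.zero_le _, ?cnt, ?ee0, ?ee2, ?A,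
    ?slot⟩
  case abi => v_inv
  case same =>
    simp only [X86.User.Spec.footprint, vspec]
    u_same
  case shadow => v_untouched
  case cnt =>
    rw [w_r15, e15, quarter_def, arg32_def]
    omega
  case ee0 =>
    rw [w_r12, add_mul4 _ _ _ edx (by omega)]
    omega
  case ee2 =>
    rw [w_rbp, add_neg_mul4 _ _ koff ecx hk1' (by rw [add_mul4 _ _ _ edx (by omega)]; omega), add_mul4 _ _ _ edx (by omega)]
    omega
  case A =>
    rw [w_rbx]
    omega
  case slot =>
    -- the dword stored at 0x105751 (`mov [rsp + 1CH], r9d`) is read back: the low half of r9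
    rw [w_mem, Mem.readLE_writeLE_same _ _ _ _ (by decide), part32_toNat, ← hk1, arg32_def]
    omega
  all_goals u_resolve
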